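-- pv_equiv track=rewrite | github.com/martijnbentum/E2ELD-cautious-fiesta | coolest.py | get_word_line_in_table
-- ===== SOURCE A (Python) =====
-- def get_word_line_in_table(table, word):
--     word_line, word_maus = None, None
--     for line in table:
--         if line[1] == 'Word':
--             word_line = line
--         if line[1] == 'ORT-MAU':
--             if line[2] == word: word_maus= line
--             if word == 'komeet' and line[2] == 'comeet':word_maus= line
--     return word_line, word_maus
-- ===== SOURCE B (Python) =====
-- def get_word_line_in_table(table, word):
--     word_line, word_maus = None, None
--     for line in reversed(table):
--         if word_line is None and line[1] == 'Word':
--             word_line = line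
--         if word_maus is None and line[1] == 'ORT-MAU' and (line[2] == word or (word == 'komeet' and line[2] == 'comeet')):
--             word_maus = line
--         if word_line is not None and word_maus is not None:
--             break
--     return word_line, word_maus
-- ===== Notes on version B (the rewrite author's own statement) =====
-- stated objective: alternative
-- what changed: B scans the table in reverse, taking the first 'Word' row and first matching ORT-MAU row and breaking as soon as both are found, instead of A's forward keep-last overwrite scan; relies on last-match-forward = first-match-in-reverse.
import Mathlib
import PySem

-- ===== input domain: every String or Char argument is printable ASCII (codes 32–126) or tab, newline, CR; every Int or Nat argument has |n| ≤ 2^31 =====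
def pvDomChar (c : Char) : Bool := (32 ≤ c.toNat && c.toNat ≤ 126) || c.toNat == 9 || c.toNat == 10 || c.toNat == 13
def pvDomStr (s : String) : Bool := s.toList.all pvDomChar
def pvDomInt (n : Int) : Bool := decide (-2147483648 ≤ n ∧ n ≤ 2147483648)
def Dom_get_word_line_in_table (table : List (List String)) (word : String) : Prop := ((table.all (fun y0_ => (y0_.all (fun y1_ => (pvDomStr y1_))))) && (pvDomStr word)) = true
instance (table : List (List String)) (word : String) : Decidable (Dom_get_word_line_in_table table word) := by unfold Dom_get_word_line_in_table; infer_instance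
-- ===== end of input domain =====

-- B scans the table in reverse with early break (first match) instead of A's forward keep-last scan; alternative decomposition, same cost.


-- ===== PORT A =====
-- forward scan, each match overwrites the accumulator (keep-last); line[1]/line[2] as pyGetD (exact under Pre_)
def get_word_line_in_table (table : List (List String)) (word : String) : Option (List String) × Option (List String) :=
  table.foldl (fun st line =>
    let word_line := if PySem.List.pyGetD line 1 "" == "Word" then some line else st.1
    let word_maus :=
      if PySem.List.pyGetD line 1 "" == "ORT-MAU" then
        let wm1 := if PySem.List.pyGetD line 2 "" == word then some line else st.2
        if word == "komeet" && (PySem.List.pyGetD line 2 "" == "comeet") then some line else wm1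
      else st.2
    (word_line, word_maus)) (none, none)

-- ===== PORT B =====
-- reverse scan: keep the FIRST match of each kind, break once both are found
def get_word_line_in_table_altGo (word : String) (wl wm : Option (List String)) :
    List (List String) → Option (List String) × Option (List String)
  | [] => (wl, wm)
  | line :: rest =>
    let wl' := if wl == none && (PySem.List.pyGetD line 1 "" == "Word") then some line else wl
    let wm' := if wm == none && (PySem.List.pyGetD line 1 "" == "ORT-MAU")
                  && (PySem.List.pyGetD line 2 "" == word
                      || (word == "komeet" && (PySem.List.pyGetD line 2 "" == "comeet")))
               then some line else wm
    if wl' ≠ none ∧ wm' ≠ none then (wl', wm')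
    else get_word_line_in_table_altGo word wl' wm' rest

def get_word_line_in_table_alt (table : List (List String)) (word : String) : Option (List String) × Option (List String) :=
  get_word_line_in_table_altGo word none none table.reverse

-- ===== PRECONDITION & SPEC =====
-- Pre_ excludes exactly the inputs where Python A raises IndexError: a row shorter than 2, or an ORT-MAU row shorter than 3.
def Pre_get_word_line_in_table (table : List (List String)) (word : String) : Prop :=
  ∀ line ∈ table, 2 ≤ line.length ∧ (line.getD 1 "" = "ORT-MAU" → 3 ≤ line.length)
instance (table : List (List String)) (word : String) : Decidable (Pre_get_word_line_in_table table word) := by unfold Pre_get_word_line_in_table; infer_instance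
def pvWitness_get_word_line_in_table : List (List String) × String := ([["x", "Word"], ["y", "ORT-MAU", "ab"]], "ab")

def Spec_get_word_line_in_table (table : List (List String)) (word : String) (out : Option (List String) × Option (List String)) : Prop := out = get_word_line_in_table_alt table word
instance (table : List (List String)) (word : String) (out : Option (List String) × Option (List String)) : Decidable (Spec_get_word_line_in_table table word out) := by unfold Spec_get_word_line_in_table; infer_instance

-- ===== CLAIM (what is proved, stated in full; the proofs are below) =====
def Claim_equal_get_word_line_in_table : Prop := ∀ (table : List (List String)) (word : String), Dom_get_word_line_in_table table word → Pre_get_word_line_in_table table word → Spec_get_word_line_in_table table word (get_word_line_in_table table word)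

-- ===== LEMMAS AND PROOFS =====

-- the two match predicates, shared by the characterisations of both ports
def pvW (line : List String) : Bool := PySem.List.pyGetD line 1 "" == "Word"
def pvM (word : String) (line : List String) : Bool :=
  (PySem.List.pyGetD line 1 "" == "ORT-MAU")
    && (PySem.List.pyGetD line 2 "" == word
        || (word == "komeet" && (PySem.List.pyGetD line 2 "" == "comeet")))

theorem pv_or_of_ne {α : Type} (o o' : Option α) (h : o ≠ none) : o.or o' = o := by
  cases o <;> simp_all

-- A characterised: keep-last forward = first match on the reversed list, else the initial value
theorem pvA_char (word : String) (l : List (List String)) (a b : Option (List String)) :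
    l.foldl (fun st line =>
      let word_line := if PySem.List.pyGetD line 1 "" == "Word" then some line else st.1
      let word_maus :=
        if PySem.List.pyGetD line 1 "" == "ORT-MAU" then
          let wm1 := if PySem.List.pyGetD line 2 "" == word then some line else st.2
          if word == "komeet" && (PySem.List.pyGetD line 2 "" == "comeet") then some line else wm1
        else st.2
      (word_line, word_maus)) (a, b)
    = ((l.reverse.find? pvW).or a, (l.reverse.find? (pvM word)).or b) := by
  induction l generalizing a b with
  | nil => simp
  | cons x l ih =>
    have h1 : (if PySem.List.pyGetD x 1 "" == "Word" then some x else a)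
        = (List.find? pvW [x]).or a := by
      by_cases h : (PySem.List.pyGetD x 1 "" == "Word") = true <;>
        simp [List.find?, pvW, h]
    have h2 : (if PySem.List.pyGetD x 1 "" == "ORT-MAU" then
          (if word == "komeet" && (PySem.List.pyGetD x 2 "" == "comeet") then some x
           else if PySem.List.pyGetD x 2 "" == word then some x else b)
        else b)
        = (List.find? (pvM word) [x]).or b := by
      by_cases hc1 : (PySem.List.pyGetD x 1 "" == "ORT-MAU") = true <;>
      by_cases hc2 : (PySem.List.pyGetD x 2 "" == word) = true <;>
      by_cases hc3 : (word == "komeet" && (PySem.List.pyGetD x 2 "" == "comeet")) = true <;>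
        simp [List.find?, pvM, hc1, hc2, hc3]
    simp only [List.foldl_cons, ih, List.reverse_cons, List.find?_append]
    rw [Option.or_assoc, Option.or_assoc, ← h1, ← h2]

-- B characterised: first-match scan with early break = initial value, else first match
theorem pvB_char (word : String) (l : List (List String)) (wl wm : Option (List String)) :
    get_word_line_in_table_altGo word wl wm l = (wl.or (l.find? pvW), wm.or (l.find? (pvM word))) := by
  induction l generalizing wl wm with
  | nil => simp [get_word_line_in_table_altGo]
  | cons x l ih =>
    simp only [get_word_line_in_table_altGo, ih]
    have hwl : (if wl == none && (PySem.List.pyGetD x 1 "" == "Word") then some x else wl)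
        = wl.or (if pvW x = true then some x else none) := by
      cases wl with
      | none => by_cases h : (PySem.List.pyGetD x 1 "" == "Word") = true <;> simp [pvW, h]
      | some v => simp
    have hwm : (if wm == none && (PySem.List.pyGetD x 1 "" == "ORT-MAU")
                  && (PySem.List.pyGetD x 2 "" == word
                      || (word == "komeet" && (PySem.List.pyGetD x 2 "" == "comeet")))
               then some x else wm)
        = wm.or (if pvM word x = true then some x else none) := by
      cases wm with
      | none =>
        by_cases h : ((PySem.List.pyGetD x 1 "" == "ORT-MAU")
            && (PySem.List.pyGetD x 2 "" == word
                || (word == "komeet" && (PySem.List.pyGetD x 2 "" == "comeet")))) = true <;>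
          simp [pvM, h]
      | some v => simp
    have hfW : (x :: l).find? pvW = (if pvW x = true then some x else none).or (l.find? pvW) := by
      by_cases h : pvW x = true <;> simp [List.find?, h]
    have hfM : (x :: l).find? (pvM word) = (if pvM word x = true then some x else none).or (l.find? (pvM word)) := by
      by_cases h : pvM word x = true <;> simp [List.find?, h]
    rw [hwl, hwm, hfW, hfM]
    generalize (if pvW x = true then some x else none) = t1
    generalize (if pvM word x = true then some x else none) = t2
    rw [← Option.or_assoc, ← Option.or_assoc]
    split_ifs with h
    · obtain ⟨hl, hm⟩ := h
      rw [pv_or_of_ne _ _ hl, pv_or_of_ne _ _ hm]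
    · rfl

-- ===== VERDICT (by name: the statement is the Claim_ definition above) =====
theorem get_word_line_in_table_spec : Claim_equal_get_word_line_in_table := by
  intro table word _ _
  unfold Spec_get_word_line_in_table get_word_line_in_table get_word_line_in_table_alt
  rw [pvA_char, pvB_char]
  simp
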